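-- pv_equiv track=rewrite | github.com/dpohanlon/wadjet | wadjet.py | detect_direct_ic_connections
-- ===== SOURCE A (Python) =====
-- from collections import defaultdict
--
-- def detect_direct_ic_connections(connections):
--     ic_direct_connections = defaultdict(set)
--
--     # Iterate through each connection entry
--     for _, pins in connections.items():
--         ic_pins = [pin for pin in pins if "U1_" in pin]
--
--         if len(ic_pins) > 1:
--             for i in range(len(ic_pins)):
--                 for j in range(i+1, len(ic_pins)):
--                     ic_direct_connections[ic_pins[i]].add(ic_pins[j])
--                     ic_direct_connections[ic_pins[j]].add(ic_pins[i])
--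
--     return dict(ic_direct_connections)
-- ===== SOURCE B (Python) =====
-- def detect_direct_ic_connections(connections):
--     # stage 1: the filtered pin groups that have at least two IC pins
--     groups = [g for g in ([pin for pin in pins if "U1_" in pin]
--                           for pins in connections.values())
--               if len(g) > 1]
--     # stage 2: gather, per pin, the raw neighbour list of each of its occurrences
--     occ = {}
--     for g in groups:
--         for i, p in enumerate(g):
--             occ.setdefault(p, []).append(g[:i] + g[i+1:])
--     # stage 3: flatten and deduplicate each pin's gathered neighbours into a set
--     return {p: {q for lst in lsts for q in lst} for p, lsts in occ.items()}
-- ===== Notes on version B (the rewrite author's own statement) =====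
-- stated objective: alternative
-- what changed: Replaces A's incremental defaultdict(set) built by a nested i<j pairwise edge loop with a staged pipeline: first build the list of qualifying pin groups, then gather per pin the raw (undeduplicated) neighbour lists of its occurrences into a plain dict of lists, and finally flatten and deduplicate each pin's gathered list into a set in a separate comprehension pass.
import Mathlib
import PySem

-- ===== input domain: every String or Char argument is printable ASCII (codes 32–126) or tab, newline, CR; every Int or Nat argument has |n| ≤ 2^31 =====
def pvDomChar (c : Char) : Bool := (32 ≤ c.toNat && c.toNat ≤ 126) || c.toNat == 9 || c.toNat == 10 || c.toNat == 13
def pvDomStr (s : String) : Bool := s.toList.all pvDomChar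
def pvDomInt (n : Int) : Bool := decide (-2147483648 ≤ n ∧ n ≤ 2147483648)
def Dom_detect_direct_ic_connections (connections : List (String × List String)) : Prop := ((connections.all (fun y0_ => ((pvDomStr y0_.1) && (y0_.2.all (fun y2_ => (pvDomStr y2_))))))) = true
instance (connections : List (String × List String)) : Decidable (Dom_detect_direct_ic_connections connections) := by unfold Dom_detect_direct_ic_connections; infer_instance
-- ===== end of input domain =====

-- B replaces A's incremental pairwise set construction by a staged pipeline (build the
-- group list, gather raw per-occurrence neighbour lists in a dict of lists, then one
-- final flatten-and-dedup pass); alternative decomposition, same cost class.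

-- ===== PORT A =====
-- for each connection: ic_pins = pins with "U1_" inside; if >1, nested i<j loop adding
-- both directions into a defaultdict(set); return dict(...) = items.
def detect_direct_ic_connections (connections : List (String × List String)) : List (String × List String) :=
  (connections.foldl (fun d p =>
    let ic_pins := p.2.filter (fun pin => PySem.Str.isIn "U1_" pin)
    if 1 < ic_pins.length then
      (PySem.List.pyRange 0 ic_pins.length).foldl (fun d i =>
        (PySem.List.pyRange (i + 1) ic_pins.length).foldl (fun d j =>
          ((d.modify (PySem.List.pyGetD ic_pins i "") [] (fun s =>
              PySem.Set.add s (PySem.List.pyGetD ic_pins j ""))).modify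
            (PySem.List.pyGetD ic_pins j "") [] (fun s =>
              PySem.Set.add s (PySem.List.pyGetD ic_pins i "")))) d) d
    else d) PySem.Dict.empty).items

-- ===== PORT B =====
-- stage 1: groups = qualifying filtered pin lists; stage 2: occ = dict pin ↦ list of the
-- raw neighbour lists g[:i]+g[i+1:] of its occurrences (setdefault(p, []).append(...));
-- stage 3: flatten and deduplicate each gathered list into a set.
def detect_direct_ic_connections_alt (connections : List (String × List String)) : List (String × List String) :=
  let groups := (connections.map (fun p => p.2.filter (fun pin => PySem.Str.isIn "U1_" pin))).filter
    (fun g => 1 < g.length)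
  let occ := groups.foldl (fun d g =>
    (PySem.List.enumerate g 0).foldl (fun d ip =>
      d.modify ip.2 [] (fun l => l ++ [PySem.List.slice g none (some ip.1) ++
        PySem.List.slice g (some (ip.1 + 1)) none])) d) PySem.Dict.empty
  occ.items.map (fun pl => (pl.1, PySem.Set.ofList pl.2.flatten))

-- ===== PRECONDITION & SPEC =====
def Spec_detect_direct_ic_connections (connections : List (String × List String)) (out : List (String × List String)) : Prop := out = detect_direct_ic_connections_alt connections
instance (connections : List (String × List String)) (out : List (String × List String)) : Decidable (Spec_detect_direct_ic_connections connections out) := by unfold Spec_detect_direct_ic_connections; infer_instance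

-- ===== CLAIM (what is proved, stated in full; the proofs are below) =====
def Claim_equal_detect_direct_ic_connections : Prop := ∀ (connections : List (String × List String)), Dom_detect_direct_ic_connections connections → Spec_detect_direct_ic_connections connections (detect_direct_ic_connections connections)

-- ===== LEMMAS AND PROOFS =====
-- (stage 1: A's pairwise loop = a one-position-at-a-time Set.update loop; stage 2: that
-- loop = B's gather-then-dedup pipeline.)
theorem pv_add_mem (s : PySem.Set String) (x : String) (h : x ∈ s) : PySem.Set.add s x = s := by
  simp [PySem.Set.add, h]
def pvOpsA : List String → List (String × String)
  | [] => []
  | x :: xs => xs.flatMap (fun y => [(x, y), (y, x)]) ++ pvOpsA xs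
def pvOpsB (pre : List String) : List String → List (String × String)
  | [] => []
  | x :: xs => (pre ++ xs).map (fun y => (x, y)) ++ pvOpsB (pre ++ [x]) xs
theorem pv_update_append (s : PySem.Set String) (u v : List String) :
    PySem.Set.update s (u ++ v) = PySem.Set.update (PySem.Set.update s u) v := by
  simp [PySem.Set.update, List.foldl_append]
theorem pv_update_absorb (s : PySem.Set String) (m : List String) (h : ∀ a ∈ m, a ∈ s) :
    PySem.Set.update s m = s := by
  induction m generalizing s with
  | nil => rfl
  | cons a m ih =>
      show PySem.Set.update (PySem.Set.add s a) m = s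
      rw [pv_add_mem s a (h a (by simp))]
      exact ih s (fun b hb => h b (by simp [hb]))
theorem pv_mem_update_right (s : PySem.Set String) (m : List String) (a : String) (h : a ∈ m) :
    a ∈ PySem.Set.update s m := (PySem.Set.mem_update s m a).2 (Or.inr h)
theorem pv_mem_add (s : PySem.Set String) (x : String) : x ∈ PySem.Set.add s x :=
  (PySem.Set.mem_add s x x).2 (Or.inr rfl)
theorem pv_mem_add_left (s : PySem.Set String) (x a : String) (h : a ∈ s) : a ∈ PySem.Set.add s x :=
  (PySem.Set.mem_add s x a).2 (Or.inl h)

theorem pv_keysA_flat (x y : String) (ys : List String) (K : PySem.Set String) :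
    PySem.Set.update K ((y :: ys).flatMap (fun t => [x, t])) = PySem.Set.update K (x :: y :: ys) := by
  induction ys generalizing y K with
  | nil => rfl
  | cons z zs ih =>
      show PySem.Set.update (PySem.Set.update K [x, y]) ((z :: zs).flatMap (fun t => [x, t])) = _
      rw [ih]
      show PySem.Set.update (PySem.Set.add ((K.add x).add y) x) (z :: zs) = _
      rw [pv_add_mem _ x (pv_mem_add_left _ _ _ (pv_mem_add _ _))]
      rfl

theorem pv_mem_opsA (l : List String) (e : String × String) (h : e ∈ pvOpsA l) :
    e.1 ∈ l ∧ e.2 ∈ l := by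
  induction l with
  | nil => simp [pvOpsA] at h
  | cons x xs ih =>
      simp only [pvOpsA, List.mem_append, List.mem_flatMap] at h
      rcases h with ⟨y, hy, he⟩ | h
      · simp at he
        rcases he with he | he <;> subst he <;> simp [hy]
      · rcases ih h with ⟨h1, h2⟩
        exact ⟨by simp [h1], by simp [h2]⟩
theorem pv_mem_opsB (l : List String) (pre : List String) (e : String × String) (h : e ∈ pvOpsB pre l) :
    e.1 ∈ l ∧ (e.2 ∈ pre ∨ e.2 ∈ l) := by
  induction l generalizing pre with
  | nil => simp [pvOpsB] at h
  | cons x xs ih =>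
      simp only [pvOpsB, List.mem_append, List.mem_map] at h
      rcases h with ⟨y, hy, he⟩ | h
      · subst he
        rcases hy with hy | hy
        · exact ⟨by simp, Or.inl hy⟩
        · exact ⟨by simp, Or.inr (by simp [hy])⟩
      · rcases ih (pre ++ [x]) h with ⟨h1, h2⟩
        refine ⟨by simp [h1], ?_⟩
        rcases h2 with h2 | h2
        · rcases List.mem_append.1 h2 with h2 | h2
          · exact Or.inl h2
          · exact Or.inr (by simp at h2; simp [h2])
        · exact Or.inr (by simp [h2])

theorem pv_update_const (x : String) (m : List String) (hm : m ≠ []) (K : PySem.Set String) :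
    PySem.Set.update K (m.map (fun _ => x)) = PySem.Set.add K x := by
  match m, hm with
  | a :: m, _ =>
    show PySem.Set.update (PySem.Set.add K x) (m.map (fun _ => x)) = _
    apply pv_update_absorb
    intro b hb
    simp only [List.mem_map] at hb
    obtain ⟨_, _, rfl⟩ := hb
    exact pv_mem_add _ _

theorem pv_keysA (l : List String) (hl : 2 ≤ l.length) (K : PySem.Set String) :
    PySem.Set.update K ((pvOpsA l).map (·.1)) = PySem.Set.update K l := by
  match l, hl with
  | x :: y :: ys, _ =>
    show PySem.Set.update K (((y :: ys).flatMap (fun t => [(x, t), (t, x)]) ++ pvOpsA (y :: ys)).map (·.1)) = _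
    rw [List.map_append, pv_update_append]
    have hflat : ((y :: ys).flatMap (fun t => [(x, t), (t, x)])).map (·.1) =
        (y :: ys).flatMap (fun t => [x, t]) := by
      simp [List.map_flatMap]
    rw [hflat, pv_keysA_flat]
    apply pv_update_absorb
    intro a ha
    simp only [List.mem_map] at ha
    obtain ⟨e, he, rfl⟩ := ha
    refine pv_mem_update_right _ _ _ ?_
    have := (pv_mem_opsA _ e he).1
    simp at this ⊢
    tauto

theorem pv_keysB (l : List String) (pre : List String) (h : pre ≠ [] ∨ 2 ≤ l.length)
    (K : PySem.Set String) :
    PySem.Set.update K ((pvOpsB pre l).map (·.1)) = PySem.Set.update K l := by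
  induction l generalizing pre K with
  | nil => rfl
  | cons x xs ih =>
      rw [show pvOpsB pre (x :: xs) = (pre ++ xs).map (fun y => (x, y)) ++ pvOpsB (pre ++ [x]) xs from rfl,
        List.map_append, pv_update_append]
      have h1 : ((pre ++ xs).map (fun y => (x, y))).map (·.1) = (pre ++ xs).map (fun _ => x) := by
        simp
      have hne : pre ++ xs ≠ [] := by
        rcases h with h | h
        · simp [h]
        · simp at h
          intro hc
          rcases List.append_eq_nil_iff.1 hc with ⟨_, h2⟩
          simp [h2] at h
      rw [h1, pv_update_const x _ hne]
      cases xs with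
      | nil =>
          show PySem.Set.update (PySem.Set.add K x) [] = _
          rfl
      | cons y ys =>
          rw [ih (pre ++ [x]) (Or.inl (by simp))]
          rfl

def pvOp (d : PySem.Dict String (List String)) (e : String × String) : PySem.Dict String (List String) :=
  d.modify e.1 [] (fun s => PySem.Set.add s e.2)

theorem pv_getD_foldl (ops : List (String × String)) (d : PySem.Dict String (List String)) (k : String) :
    (ops.foldl pvOp d).getD k [] =
      PySem.Set.update (d.getD k []) ((ops.filter (fun e => e.1 == k)).map (·.2)) := by
  induction ops generalizing d with
  | nil => rfl
  | cons e ops ih =>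
      show (ops.foldl pvOp (pvOp d e)).getD k [] = _
      rw [ih]
      have hg : (pvOp d e).getD k [] =
          if k = e.1 then PySem.Set.add (d.getD e.1 []) e.2 else d.getD k [] := by
        show ((d.insert e.1 _).getD k []) = _
        rw [PySem.Dict.getD_insert]
      by_cases hk : e.1 = k
      · rw [List.filter_cons_of_pos (by simp [hk]), hg, if_pos hk.symm, hk]
        rfl
      · rw [List.filter_cons_of_neg (by simp [hk]), hg, if_neg (fun hc => hk hc.symm)]

theorem pv_eqlistA1 (k : String) (v : List String) :
    ((v.flatMap (fun y => [(k, y), (y, k)])).filter (fun e => e.1 == k)).map (·.2) =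
      v.flatMap (fun y => y :: if y == k then [k] else []) := by
  induction v with
  | nil => rfl
  | cons y ys ih =>
      by_cases hy : y = k <;>
        simp [hy, ih]

theorem pv_subA1 (k : String) (v : List String) (s : PySem.Set String) :
    PySem.Set.update s (v.flatMap (fun y => y :: if y == k then [k] else [])) =
      PySem.Set.update s v := by
  induction v generalizing s with
  | nil => rfl
  | cons y ys ih =>
      rw [List.flatMap_cons]
      by_cases hy : y = k
      · subst hy
        rw [show (if (y == y) = true then [y] else []) = [y] from by simp]
        rw [pv_update_append]
        show PySem.Set.update (PySem.Set.add (PySem.Set.add s y) y) (ys.flatMap _) = _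
        rw [pv_add_mem _ y (pv_mem_add _ _)]
        exact ih _
      · rw [show (if (y == k) = true then [k] else []) = [] from by simp [hy]]
        rw [pv_update_append]
        exact ih _

theorem pv_eqlistA2 (k a : String) (ha : a ≠ k) (rest : List String) :
    ((rest.flatMap (fun y => [(a, y), (y, a)])).filter (fun e => e.1 == k)).map (·.2) =
      rest.flatMap (fun y => if y == k then [a] else []) := by
  induction rest with
  | nil => rfl
  | cons y ys ih =>
      by_cases hy : y = k <;>
        simp [hy, ha, ih]

theorem pv_subA3 (k a : String) (rest : List String) (hk : k ∈ rest) (s : PySem.Set String) :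
    PySem.Set.update s (rest.flatMap (fun y => if y == k then [a] else [])) =
      PySem.Set.add s a := by
  induction rest generalizing s with
  | nil => simp at hk
  | cons y ys ih =>
      by_cases hy : y = k
      · show PySem.Set.update s ((if y == k then [a] else []) ++ ys.flatMap _) = _
        rw [if_pos (by simp [hy]), pv_update_append]
        show PySem.Set.update (PySem.Set.add s a) _ = _
        apply pv_update_absorb
        intro b hb
        simp only [List.mem_flatMap] at hb
        obtain ⟨t, _, hbt⟩ := hb
        have : b = a := by
          by_cases ht : t = k <;> simp [ht] at hbt <;> tauto
        exact this ▸ pv_mem_add _ _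
      · show PySem.Set.update s ((if y == k then [a] else []) ++ ys.flatMap _) = _
        rw [if_neg (by simp [hy]), List.nil_append]
        exact ih (List.mem_of_ne_of_mem (fun h => hy h.symm) hk) _

theorem pv_valA (k : String) (u v : List String) (hu : k ∉ u) (s : PySem.Set String) :
    PySem.Set.update s (((pvOpsA (u ++ k :: v)).filter (fun e => e.1 == k)).map (·.2)) =
      PySem.Set.update s (u ++ v) := by
  induction u generalizing s with
  | nil =>
      rw [List.nil_append, show pvOpsA (k :: v) = v.flatMap (fun y => [(k, y), (y, k)]) ++ pvOpsA v from rfl,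
        List.filter_append, List.map_append, pv_update_append, pv_eqlistA1, pv_subA1]
      rw [List.nil_append]
      apply pv_update_absorb
      intro a ha
      simp only [List.mem_map, List.mem_filter] at ha
      obtain ⟨e, ⟨he, _⟩, rfl⟩ := ha
      exact pv_mem_update_right _ _ _ ((pv_mem_opsA _ e he).2)
  | cons a u' ih =>
      have hak : a ≠ k := fun h => hu (by simp [h])
      rw [List.cons_append, show pvOpsA (a :: (u' ++ k :: v)) =
          (u' ++ k :: v).flatMap (fun y => [(a, y), (y, a)]) ++ pvOpsA (u' ++ k :: v) from rfl,
        List.filter_append, List.map_append, pv_update_append, pv_eqlistA2 k a hak,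
        pv_subA3 k a _ (by simp)]
      rw [ih (fun h => hu (by simp [h]))]
      rfl

theorem pv_valB (k : String) (u : List String) (pre v : List String) (hu : k ∉ u) (s : PySem.Set String) :
    PySem.Set.update s (((pvOpsB pre (u ++ k :: v)).filter (fun e => e.1 == k)).map (·.2)) =
      PySem.Set.update s (pre ++ u ++ v) := by
  induction u generalizing pre s with
  | nil =>
      rw [List.nil_append, show pvOpsB pre (k :: v) =
          (pre ++ v).map (fun y => (k, y)) ++ pvOpsB (pre ++ [k]) v from rfl,
        List.filter_append, List.map_append, pv_update_append]
      have h1 : (((pre ++ v).map (fun y => (k, y))).filter (fun e => e.1 == k)).map (·.2) = pre ++ v := by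
        simp [List.filter_map, Function.comp_def]
      rw [h1]
      have habs : PySem.Set.update (PySem.Set.update s (pre ++ v))
          (((pvOpsB (pre ++ [k]) v).filter (fun e => e.1 == k)).map (·.2)) =
          PySem.Set.update s (pre ++ v) := by
        apply pv_update_absorb
        intro a ha
        simp only [List.mem_map, List.mem_filter] at ha
        obtain ⟨e, ⟨he, hek⟩, rfl⟩ := ha
        have hm := pv_mem_opsB _ _ e he
        have hkv : k ∈ v := by
          have := hm.1
          rwa [eq_of_beq hek] at this
        rcases hm.2 with h2 | h2
        · rcases List.mem_append.1 h2 with h2 | h2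
          · exact pv_mem_update_right _ _ _ (List.mem_append.2 (Or.inl h2))
          · simp at h2
            exact pv_mem_update_right _ _ _ (List.mem_append.2 (Or.inr (h2 ▸ hkv)))
        · exact pv_mem_update_right _ _ _ (List.mem_append.2 (Or.inr h2))
      rw [habs]
      simp
  | cons a u' ih =>
      have hak : a ≠ k := fun h => hu (by simp [h])
      rw [List.cons_append, show pvOpsB pre (a :: (u' ++ k :: v)) =
          (pre ++ (u' ++ k :: v)).map (fun y => (a, y)) ++ pvOpsB (pre ++ [a]) (u' ++ k :: v) from rfl,
        List.filter_append, List.map_append, pv_update_append]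
      have h0 : (((pre ++ (u' ++ k :: v)).map (fun y => (a, y))).filter (fun e => e.1 == k)).map (·.2) =
          ([] : List String) := by
        simp [List.filter_map, Function.comp_def, hak]
      rw [h0]
      show PySem.Set.update (PySem.Set.update s _) _ = _
      rw [show PySem.Set.update s ([] : List String) = s from rfl]
      rw [ih (pre ++ [a]) (fun h => hu (by simp [h]))]
      simp

theorem pv_first_occ {k : String} {l : List String} (h : k ∈ l) :
    ∃ u v, l = u ++ k :: v ∧ k ∉ u := by
  induction l with
  | nil => simp at h
  | cons x xs ih =>
      by_cases hx : k = x
      · exact ⟨[], xs, by simp [hx], by simp⟩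
      · obtain ⟨u, v, rfl, hu⟩ := ih (List.mem_of_ne_of_mem hx h)
        exact ⟨x :: u, v, rfl, by simp [hu]; exact hx⟩

theorem pv_nodup_fold (ops : List (String × String)) (d : PySem.Dict String (List String))
    (hnd : d.keys.Nodup) : (ops.foldl pvOp d).keys.Nodup :=
  PySem.Dict.nodup_keys_foldl_modify_key ops Prod.fst []
    (fun _ e s => PySem.Set.add s e.2) d hnd

theorem pv_keys_fold (ops : List (String × String)) (d : PySem.Dict String (List String)) :
    (ops.foldl pvOp d).keys = PySem.Set.update d.keys (ops.map (·.1)) :=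
  PySem.Dict.keys_foldl_modify_key ops Prod.fst [] (fun _ e s => PySem.Set.add s e.2) d

theorem pv_ops_eq (l : List String) (hl : 2 ≤ l.length) (d : PySem.Dict String (List String))
    (hnd : d.keys.Nodup) :
    (pvOpsA l).foldl pvOp d = (pvOpsB [] l).foldl pvOp d := by
  have ndA := pv_nodup_fold (pvOpsA l) d hnd
  have ndB := pv_nodup_fold (pvOpsB [] l) d hnd
  apply PySem.Dict.ext
  rw [PySem.Dict.items_eq_map_keys _ ndA ([] : List String),
    PySem.Dict.items_eq_map_keys _ ndB ([] : List String)]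
  have hkeys : ((pvOpsA l).foldl pvOp d).keys = ((pvOpsB [] l).foldl pvOp d).keys := by
    rw [pv_keys_fold, pv_keys_fold, pv_keysA l hl, pv_keysB l [] (Or.inr hl)]
  rw [← hkeys]
  apply List.map_congr_left
  intro k hk
  have hval : ((pvOpsA l).foldl pvOp d).getD k [] = ((pvOpsB [] l).foldl pvOp d).getD k [] := by
    rw [pv_getD_foldl, pv_getD_foldl]
    by_cases hkl : k ∈ l
    · obtain ⟨u, v, rfl, hu⟩ := pv_first_occ hkl
      rw [pv_valA k u v hu, pv_valB k u [] v hu]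
      simp
    · have hA : (pvOpsA l).filter (fun e => e.1 == k) = [] := by
        apply List.filter_eq_nil_iff.2
        intro e he
        simp only [beq_iff_eq]
        exact fun hc => hkl (hc ▸ (pv_mem_opsA _ e he).1)
      have hB : (pvOpsB [] l).filter (fun e => e.1 == k) = [] := by
        apply List.filter_eq_nil_iff.2
        intro e he
        simp only [beq_iff_eq]
        exact fun hc => hkl (hc ▸ (pv_mem_opsB _ _ e he).1)
      rw [hA, hB]
  rw [hval]

theorem pv_drop_cons {l w : List String} {k : Nat} {x : String} (h : l.drop k = x :: w) :
    k < l.length ∧ PySem.List.pyGetD l (k : Int) "" = x ∧ l.drop (k + 1) = w ∧ l[k]? = some x := by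
  have hk : k < l.length := by
    by_contra hc
    rw [List.drop_eq_nil_of_le (by omega)] at h
    simp at h
  have hx : l[k]? = some x := by
    have := (List.getElem?_drop (xs := l) (i := k) (j := 0)).symm
    rw [h] at this
    simpa using this
  refine ⟨hk, ?_, ?_, hx⟩
  · rw [PySem.List.pyGetD_natCast, List.getD_eq_getElem?_getD, hx]
    rfl
  · have : l.drop (k + 1) = (l.drop k).drop 1 := by
      rw [List.drop_drop]
    rw [this, h]
    rfl

theorem pv_bridgeA_inner (l : List String) (x : String) (w : List String) (k : Nat)
    (hw : l.drop k = w) (d : PySem.Dict String (List String)) :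
    (PySem.List.pyRange (k : Int) (l.length : Int)).foldl (fun d j =>
        ((d.modify x [] (fun s => PySem.Set.add s (PySem.List.pyGetD l j ""))).modify
          (PySem.List.pyGetD l j "") [] (fun s => PySem.Set.add s x))) d =
      (w.flatMap (fun y => [(x, y), (y, x)])).foldl pvOp d := by
  induction w generalizing k d with
  | nil =>
      have hk : l.length ≤ k := by
        by_contra hc
        rw [show l.drop k = l.drop k from rfl] at hw
        have := List.drop_eq_nil_iff.1 hw
        omega
      rw [PySem.List.pyRange_one_eq_nil (by exact_mod_cast hk)]
      rfl
  | cons y w' ih =>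
      obtain ⟨hk, hy, hdrop, hgx⟩ := pv_drop_cons hw
      rw [PySem.List.pyRange_one_cons (by exact_mod_cast hk)]
      simp only [List.foldl_cons, List.flatMap_cons, List.foldl_append]
      rw [hy]
      have hcast : ((k : Int) + 1) = ((k + 1 : Nat) : Int) := by push_cast; ring
      rw [hcast]
      exact ih (k + 1) hdrop _

theorem pv_bridgeA (l : List String) (w : List String) (k : Nat)
    (hw : l.drop k = w) (d : PySem.Dict String (List String)) :
    (PySem.List.pyRange (k : Int) (l.length : Int)).foldl (fun d i =>
        (PySem.List.pyRange (i + 1) (l.length : Int)).foldl (fun d j =>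
          ((d.modify (PySem.List.pyGetD l i "") [] (fun s =>
              PySem.Set.add s (PySem.List.pyGetD l j ""))).modify
            (PySem.List.pyGetD l j "") [] (fun s =>
              PySem.Set.add s (PySem.List.pyGetD l i "")))) d) d =
      (pvOpsA w).foldl pvOp d := by
  induction w generalizing k d with
  | nil =>
      have hk : l.length ≤ k := by
        by_contra hc
        have := List.drop_eq_nil_iff.1 hw
        omega
      rw [PySem.List.pyRange_one_eq_nil (by exact_mod_cast hk)]
      rfl
  | cons y w' ih =>
      obtain ⟨hk, hy, hdrop, hgx⟩ := pv_drop_cons hw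
      rw [PySem.List.pyRange_one_cons (by exact_mod_cast hk)]
      simp only [List.foldl_cons]
      rw [hy, show pvOpsA (y :: w') = w'.flatMap (fun t => [(y, t), (t, y)]) ++ pvOpsA w' from rfl,
        List.foldl_append]
      have hcast : ((k : Int) + 1) = ((k + 1 : Nat) : Int) := by push_cast; ring
      rw [hcast, pv_bridgeA_inner l y w' (k + 1) hdrop d]
      exact ih (k + 1) hdrop _

theorem pv_modify_modify (d : PySem.Dict String (List String)) (k : String)
    (f g : List String → List String) :
    (d.modify k [] f).modify k [] g = d.modify k [] (fun s => g (f s)) := by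
  show ((d.insert k (f (d.getD k []))).insert k
      (g ((d.insert k (f (d.getD k []))).getD k []))) = d.insert k (g (f (d.getD k [])))
  rw [PySem.Dict.insert_insert_self]
  have hgd : (d.insert k (f (d.getD k []))).getD k [] = f (d.getD k []) := by
    show ((d.insert k (f (d.getD k []))).get? k).getD [] = _
    rw [PySem.Dict.get?_insert_self]
    rfl
  rw [hgd]

theorem pv_modify_update (x : String) (v : String) (m : List String)
    (d : PySem.Dict String (List String)) :
    d.modify x [] (fun s => PySem.Set.update s (v :: m)) =
      ((v :: m).map (fun y => (x, y))).foldl pvOp d := by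
  induction m generalizing d v with
  | nil => rfl
  | cons v' m ih =>
      have h1 : (fun s => PySem.Set.update s (v :: v' :: m)) =
          (fun s => PySem.Set.update (PySem.Set.add s v) (v' :: m)) := rfl
      rw [h1, ← pv_modify_modify d x (fun s => PySem.Set.add s v)
        (fun s => PySem.Set.update s (v' :: m))]
      show _ = ((v' :: m).map (fun y => (x, y))).foldl pvOp (pvOp d (x, v))
      exact ih _ _

theorem pv_bridgeB (l : List String) (hl : 2 ≤ l.length) (w : List String) (k : Nat)
    (hw : l.drop k = w) (d : PySem.Dict String (List String)) :
    (PySem.List.pyRange (k : Int) (l.length : Int)).foldl (fun d i =>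
        d.modify (PySem.List.pyGetD l i "") [] (fun s =>
          PySem.Set.update s (PySem.List.slice l none (some i) ++
            PySem.List.slice l (some (i + 1)) none))) d =
      (pvOpsB (l.take k) w).foldl pvOp d := by
  induction w generalizing k d with
  | nil =>
      have hk : l.length ≤ k := by
        by_contra hc
        have := List.drop_eq_nil_iff.1 hw
        omega
      rw [PySem.List.pyRange_one_eq_nil (by exact_mod_cast hk)]
      rfl
  | cons x w' ih =>
      obtain ⟨hk, hx, hdrop, hgx⟩ := pv_drop_cons hw
      rw [PySem.List.pyRange_one_cons (by exact_mod_cast hk)]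
      simp only [List.foldl_cons]
      rw [hx]
      have hcast : ((k : Int) + 1) = ((k + 1 : Nat) : Int) := by push_cast; ring
      have hsl1 : PySem.List.slice l none (some (k : Int)) = l.take k := by
        rw [PySem.List.slice_to l (by positivity)]
        simp
      have hsl2 : PySem.List.slice l (some ((k : Int) + 1)) none = w' := by
        rw [hcast, PySem.List.slice_from l (by positivity)]
        rw [Int.toNat_natCast]
        exact hdrop
      rw [hsl1, hsl2]
      have hne : l.take k ++ w' ≠ [] := by
        intro hc
        rcases List.append_eq_nil_iff.1 hc with ⟨h1, h2⟩
        have hk0 : k = 0 := by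
          rcases List.take_eq_nil_iff.1 h1 with h | h
          · exact h
          · rw [h] at hl; simp at hl
        have h3 := congrArg List.length hw
        simp [hk0, h2] at h3
        omega
      obtain ⟨v, m, hvm⟩ := List.exists_cons_of_ne_nil hne
      rw [hvm, pv_modify_update]
      rw [show pvOpsB (l.take k) (x :: w') =
          (l.take k ++ w').map (fun y => (x, y)) ++ pvOpsB (l.take k ++ [x]) w' from rfl,
        List.foldl_append, hvm]
      have htk : l.take k ++ [x] = l.take (k + 1) := by
        rw [List.take_add_one, hgx]
        rfl
      rw [htk, hcast]
      exact ih (k + 1) hdrop _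

def pvBodyA (d : PySem.Dict String (List String)) (p : String × List String) :
    PySem.Dict String (List String) :=
  let ic_pins := p.2.filter (fun pin => PySem.Str.isIn "U1_" pin)
  if 1 < ic_pins.length then
    (PySem.List.pyRange 0 ic_pins.length).foldl (fun d i =>
      (PySem.List.pyRange (i + 1) ic_pins.length).foldl (fun d j =>
        ((d.modify (PySem.List.pyGetD ic_pins i "") [] (fun s =>
            PySem.Set.add s (PySem.List.pyGetD ic_pins j ""))).modify
          (PySem.List.pyGetD ic_pins j "") [] (fun s =>
            PySem.Set.add s (PySem.List.pyGetD ic_pins i "")))) d) d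
  else d

def pvBodyB (d : PySem.Dict String (List String)) (p : String × List String) :
    PySem.Dict String (List String) :=
  let ic_pins := p.2.filter (fun pin => PySem.Str.isIn "U1_" pin)
  if 1 < ic_pins.length then
    (PySem.List.pyRange 0 ic_pins.length).foldl (fun d i =>
      d.modify (PySem.List.pyGetD ic_pins i "") [] (fun s =>
        PySem.Set.update s (PySem.List.slice ic_pins none (some i) ++
          PySem.List.slice ic_pins (some (i + 1)) none))) d
  else d

theorem pv_step (p : String × List String) (d : PySem.Dict String (List String))
    (hnd : d.keys.Nodup) :
    pvBodyA d p = pvBodyB d p ∧ (pvBodyA d p).keys.Nodup := by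
  unfold pvBodyA pvBodyB
  set l := p.2.filter (fun pin => PySem.Str.isIn "U1_" pin) with hldef
  by_cases hg : 1 < l.length
  · rw [if_pos hg, if_pos hg]
    have h2 : 2 ≤ l.length := hg
    have hA := pv_bridgeA l l 0 (by simp) d
    have hB := pv_bridgeB l h2 l 0 (by simp) d
    rw [show ((0 : Nat) : Int) = 0 from rfl] at hA hB
    rw [show l.take 0 = [] from rfl] at hB
    constructor
    · rw [hA, hB]
      exact pv_ops_eq l h2 d hnd
    · rw [hA]
      exact pv_nodup_fold _ _ hnd
  · rw [if_neg hg, if_neg hg]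
    exact ⟨rfl, hnd⟩

theorem pv_main (cs : List (String × List String)) (d : PySem.Dict String (List String))
    (hnd : d.keys.Nodup) :
    cs.foldl pvBodyA d = cs.foldl pvBodyB d := by
  induction cs generalizing d with
  | nil => rfl
  | cons p cs ih =>
      simp only [List.foldl_cons]
      obtain ⟨heq, hnd2⟩ := pv_step p d hnd
      rw [heq] at hnd2 ⊢
      exact ih _ hnd2

-- ===== stage 2: the one-position-at-a-time Set.update fold equals B's staged pipeline =====

-- the per-position operations of one group: (pin at i, neighbours g[:i] ++ g[i+1:])
def pvPosOps (g : List String) : List (String × List String) :=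
  (PySem.List.enumerate g 0).map (fun ip => (ip.2,
    PySem.List.slice g none (some ip.1) ++ PySem.List.slice g (some (ip.1 + 1)) none))

def pvUpdOp (d : PySem.Dict String (PySem.Set String)) (e : String × List String) :
    PySem.Dict String (PySem.Set String) :=
  d.modify e.1 [] (fun s => PySem.Set.update s e.2)

def pvOccOp (d : PySem.Dict String (List (List String))) (e : String × List String) :
    PySem.Dict String (List (List String)) :=
  d.modify e.1 [] (fun l => l ++ [e.2])

def pvGroups (connections : List (String × List String)) : List (List String) :=
  (connections.map (fun p => p.2.filter (fun pin => PySem.Str.isIn "U1_" pin))).filter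
    (fun g => 1 < g.length)

-- the guarded fold over connections is the fold over the filtered group list
theorem pv_fold_groups {α : Type} (F : α → List String → α) (cs : List (String × List String))
    (d : α) :
    cs.foldl (fun d p =>
        let g := p.2.filter (fun pin => PySem.Str.isIn "U1_" pin)
        if 1 < g.length then F d g else d) d =
      (pvGroups cs).foldl F d := by
  induction cs generalizing d with
  | nil => rfl
  | cons p cs ih =>
      show (cs.foldl _ (if 1 < (p.2.filter _).length then F d _ else d)) = _
      have hgr : pvGroups (p :: cs) =
          if 1 < (p.2.filter (fun pin => PySem.Str.isIn "U1_" pin)).length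
          then p.2.filter (fun pin => PySem.Str.isIn "U1_" pin) :: pvGroups cs
          else pvGroups cs := by
        unfold pvGroups
        rw [List.map_cons, List.filter_cons]
        by_cases hg : 1 < (p.2.filter (fun pin => PySem.Str.isIn "U1_" pin)).length
        · rw [if_pos (decide_eq_true hg), if_pos hg]
        · rw [if_neg (by simp only [decide_eq_true_eq]; exact hg), if_neg hg]
      by_cases hg : 1 < (p.2.filter (fun pin => PySem.Str.isIn "U1_" pin)).length
      · rw [if_pos hg, ih, hgr, if_pos hg, List.foldl_cons]
      · rw [if_neg hg, ih, hgr, if_neg hg]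

-- a fold of per-group folds is one fold over the concatenated operation lists
theorem pv_fold_flat {α β γ : Type} (ops : β → List γ) (F : α → γ → α)
    (gs : List β) (d : α) :
    gs.foldl (fun d g => (ops g).foldl F d) d = (gs.flatMap ops).foldl F d := by
  induction gs generalizing d with
  | nil => rfl
  | cons g gs ih =>
      simp only [List.foldl_cons, List.flatMap_cons, List.foldl_append]
      exact ih _

-- the one-pass Set.update body over a group is the pvUpdOp fold over its position ops
theorem pv_old_step (g : List String) (d : PySem.Dict String (PySem.Set String)) :
    (PySem.List.pyRange 0 g.length).foldl (fun d i =>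
        d.modify (PySem.List.pyGetD g i "") [] (fun s =>
          PySem.Set.update s (PySem.List.slice g none (some i) ++
            PySem.List.slice g (some (i + 1)) none))) d =
      (pvPosOps g).foldl pvUpdOp d := by
  unfold pvPosOps
  rw [PySem.List.enumerate_eq_map_pyRange g "", List.map_map, List.foldl_map]
  rfl

-- B's gathering body over a group is the pvOccOp fold over the same position ops
theorem pv_new_step (g : List String) (d : PySem.Dict String (List (List String))) :
    (PySem.List.enumerate g 0).foldl (fun d ip =>
        d.modify ip.2 [] (fun l => l ++ [PySem.List.slice g none (some ip.1) ++
          PySem.List.slice g (some (ip.1 + 1)) none])) d =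
      (pvPosOps g).foldl pvOccOp d := by
  unfold pvPosOps
  rw [List.foldl_map]
  rfl

-- value of the Set.update fold at any key: update with the flattened filtered neighbours
theorem pv_getD_foldl_upd (ops : List (String × List String))
    (d : PySem.Dict String (PySem.Set String)) (k : String) :
    (ops.foldl pvUpdOp d).getD k [] =
      PySem.Set.update (d.getD k []) (((ops.filter (fun e => e.1 == k)).map (·.2)).flatten) := by
  induction ops generalizing d with
  | nil => rfl
  | cons e ops ih =>
      show (ops.foldl pvUpdOp (pvUpdOp d e)).getD k [] = _
      rw [ih]
      have hg : (pvUpdOp d e).getD k [] =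
          if k = e.1 then PySem.Set.update (d.getD e.1 []) e.2 else d.getD k [] := by
        show ((d.insert e.1 _).getD k []) = _
        rw [PySem.Dict.getD_insert]
      by_cases hk : e.1 = k
      · rw [List.filter_cons_of_pos (by simp [hk]), hg, if_pos hk.symm, hk]
        simp only [List.map_cons, List.flatten_cons]
        rw [pv_update_append]
      · rw [List.filter_cons_of_neg (by simp [hk]), hg, if_neg (fun hc => hk hc.symm)]

theorem pv_nodup_fold_upd (ops : List (String × List String))
    (d : PySem.Dict String (PySem.Set String)) (hnd : d.keys.Nodup) :
    (ops.foldl pvUpdOp d).keys.Nodup :=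
  PySem.Dict.nodup_keys_foldl_modify_key ops Prod.fst []
    (fun _ e s => PySem.Set.update s e.2) d hnd

theorem pv_nodup_fold_occ (ops : List (String × List String))
    (d : PySem.Dict String (List (List String))) (hnd : d.keys.Nodup) :
    (ops.foldl pvOccOp d).keys.Nodup :=
  PySem.Dict.nodup_keys_foldl_modify_key ops Prod.fst []
    (fun _ e l => l ++ [e.2]) d hnd

-- the two folds over the same ops list from empty dicts agree up to the final dedup map
theorem pv_stage2 (ops : List (String × List String)) :
    (ops.foldl pvUpdOp PySem.Dict.empty).items =
      ((ops.foldl pvOccOp PySem.Dict.empty).items).map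
        (fun pl => (pl.1, PySem.Set.ofList pl.2.flatten)) := by
  have hndE1 : (PySem.Dict.empty : PySem.Dict String (PySem.Set String)).keys.Nodup := by
    simp [PySem.Dict.empty, PySem.Dict.keys]
  have hndE2 : (PySem.Dict.empty : PySem.Dict String (List (List String))).keys.Nodup := by
    simp [PySem.Dict.empty, PySem.Dict.keys]
  have hnd1 := pv_nodup_fold_upd ops _ hndE1
  have hnd2 := pv_nodup_fold_occ ops _ hndE2
  rw [PySem.Dict.items_eq_map_keys _ hnd1 ([] : PySem.Set String),
    PySem.Dict.items_eq_map_keys _ hnd2 ([] : List (List String))]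
  have hk1 : (ops.foldl pvUpdOp PySem.Dict.empty).keys =
      PySem.Set.update (PySem.Dict.empty : PySem.Dict String (PySem.Set String)).keys (ops.map (·.1)) :=
    PySem.Dict.keys_foldl_modify_key ops Prod.fst [] (fun _ e s => PySem.Set.update s e.2) _
  have hk2 : (ops.foldl pvOccOp PySem.Dict.empty).keys =
      PySem.Set.update (PySem.Dict.empty : PySem.Dict String (List (List String))).keys (ops.map (·.1)) :=
    PySem.Dict.keys_foldl_modify_key ops Prod.fst [] (fun _ e l => l ++ [e.2]) _
  have hkeys : (ops.foldl pvUpdOp PySem.Dict.empty).keys =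
      (ops.foldl pvOccOp PySem.Dict.empty).keys := by
    rw [hk1, hk2]
    rfl
  rw [hkeys, List.map_map]
  apply List.map_congr_left
  intro k hk
  show (k, (ops.foldl pvUpdOp PySem.Dict.empty).getD k []) =
    (k, PySem.Set.ofList ((ops.foldl pvOccOp PySem.Dict.empty).getD k []).flatten)
  rw [pv_getD_foldl_upd]
  have hocc : (ops.foldl pvOccOp PySem.Dict.empty).getD k [] =
      (PySem.Dict.empty : PySem.Dict String (List (List String))).getD k [] ++
        (ops.filter (fun e => e.1 == k)).map (·.2) :=
    PySem.Dict.getD_foldl_modify_append ops PySem.Dict.empty k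
  rw [hocc]
  rw [show (PySem.Dict.empty : PySem.Dict String (List (List String))).getD k [] = [] from rfl]
  rw [List.nil_append]
  rfl

-- ===== VERDICT (by name: the statement is the Claim_ definition above) =====
theorem detect_direct_ic_connections_spec : Claim_equal_detect_direct_ic_connections := by
  intro connections _
  unfold Spec_detect_direct_ic_connections
  show (connections.foldl pvBodyA PySem.Dict.empty).items = _
  rw [pv_main connections PySem.Dict.empty (by simp [PySem.Dict.empty, PySem.Dict.keys])]
  show (connections.foldl pvBodyB PySem.Dict.empty).items =
    ((pvGroups connections).foldl (fun d g =>
      (PySem.List.enumerate g 0).foldl (fun d ip =>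
        d.modify ip.2 [] (fun l => l ++ [PySem.List.slice g none (some ip.1) ++
          PySem.List.slice g (some (ip.1 + 1)) none])) d) PySem.Dict.empty).items.map
      (fun pl => (pl.1, PySem.Set.ofList pl.2.flatten))
  have hB : connections.foldl pvBodyB PySem.Dict.empty =
      (pvGroups connections).foldl (fun d g => (pvPosOps g).foldl pvUpdOp d) PySem.Dict.empty := by
    rw [← pv_fold_groups (fun d g => (pvPosOps g).foldl pvUpdOp d) connections]
    refine PySem.List.foldl_congr_mem connections _ _ _ ?_
    intro d p _
    show pvBodyB d p = _
    unfold pvBodyB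
    by_cases hg : 1 < (p.2.filter (fun pin => PySem.Str.isIn "U1_" pin)).length
    · rw [if_pos hg, if_pos hg]
      exact pv_old_step _ d
    · rw [if_neg hg, if_neg hg]
  have hN : (pvGroups connections).foldl (fun d g =>
      (PySem.List.enumerate g 0).foldl (fun d ip =>
        d.modify ip.2 [] (fun l => l ++ [PySem.List.slice g none (some ip.1) ++
          PySem.List.slice g (some (ip.1 + 1)) none])) d) PySem.Dict.empty =
      (pvGroups connections).foldl (fun d g => (pvPosOps g).foldl pvOccOp d) PySem.Dict.empty := by
    refine PySem.List.foldl_congr_mem _ _ _ _ ?_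
    intro d g _
    exact pv_new_step g d
  rw [hB, hN, pv_fold_flat pvPosOps pvUpdOp, pv_fold_flat pvPosOps pvOccOp]
  exact pv_stage2 _
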